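-- pv_equiv track=rewrite | github.com/Brasme/batteries_4_of_8 | batteries_sim.py | simulate_sequence
-- ===== SOURCE A (Python) =====
-- def simulate_sequence(pairs, placements):
--     """Simulate the provided ordered list of pairs against all placements.
--
--     Returns a dict mapping placement->dict of {2:tests,3:tests,4:tests} (tests is int or None).
--     """
--     results = {}
--     for placement in placements:
--         confirmed = set()
--         needed = {2: None, 3: None, 4: None}
--         for t, pair in enumerate(pairs, start=1):
--             a, b = pair
--             # test True only if both batteries are good
--             if a in placement and b in placement:
--                 confirmed.add(a)
--                 confirmed.add(b)
--             for k in (2, 3, 4):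
--                 if needed[k] is None and len(confirmed) >= k:
--                     needed[k] = t
--             if all(v is not None for v in needed.values()):
--                 break
--         results[placement] = needed
--     return results
-- ===== SOURCE B (Python) =====
-- def simulate_sequence(pairs, placements):
--     """Simulate the provided ordered list of pairs against all placements.
--
--     Returns a dict mapping placement->dict of {2:tests,3:tests,4:tests} (tests is int or None).
--
--     Different algorithm: instead of growing a confirmed set and watching its size,
--     compute for each battery the first test index that confirms it (a passing test
--     confirms both of its batteries), then sort those first-confirmation times; the
--     k-th smallest time is exactly the first test after which k batteries are
--     confirmed, so needed[k] is the (k-1)-th sorted time.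
--     """
--     results = {}
--     for placement in placements:
--         first = {}
--         for t, (a, b) in enumerate(pairs, start=1):
--             if a in placement and b in placement:
--                 first.setdefault(a, t)
--                 first.setdefault(b, t)
--         times = sorted(first.values())
--         results[placement] = {k: times[k - 1] if len(times) >= k else None
--                               for k in (2, 3, 4)}
--     return results
-- ===== Notes on version B (the rewrite author's own statement) =====
-- stated objective: alternative
-- what changed: B drops A's growing confirmed-set with inline 2/3/4 threshold checks and early break; it instead computes each battery's first confirmation time into a map, sorts those times, and reads needed[k] off as the (k-1)-th smallest time.
import Mathlib
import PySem

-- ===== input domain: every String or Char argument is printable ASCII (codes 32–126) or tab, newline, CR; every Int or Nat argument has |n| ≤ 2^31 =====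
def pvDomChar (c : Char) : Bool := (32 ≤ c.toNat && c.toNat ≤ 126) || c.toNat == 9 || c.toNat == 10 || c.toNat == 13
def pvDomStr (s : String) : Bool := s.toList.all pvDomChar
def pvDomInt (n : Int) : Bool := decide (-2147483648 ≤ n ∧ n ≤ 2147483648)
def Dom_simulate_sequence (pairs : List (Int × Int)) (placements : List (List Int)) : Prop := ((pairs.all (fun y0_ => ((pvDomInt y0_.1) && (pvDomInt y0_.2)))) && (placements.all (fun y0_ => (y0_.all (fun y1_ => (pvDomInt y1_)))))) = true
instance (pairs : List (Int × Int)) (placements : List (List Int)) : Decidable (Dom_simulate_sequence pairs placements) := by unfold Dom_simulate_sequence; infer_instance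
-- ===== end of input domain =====

-- B replaces A's growing confirmed-set with inline 2/3/4 threshold checks (and early break) by a
-- per-battery first-confirmation-time map, sorted once, with needed[k] read off as the (k-1)-th time.

-- ===== PORT A =====

-- inner loop of A over enumerate(pairs, start=1); returns `needed` at the break / loop end
def simAloop (placement : List Int) : List (Int × (Int × Int)) → PySem.Set Int →
    PySem.Dict Int (Option Int) → PySem.Dict Int (Option Int)
  | [], _, needed => needed
  | (t, (a, b)) :: rest, confirmed, needed =>
    let confirmed := if placement.contains a && placement.contains b then
        (PySem.Set.add (PySem.Set.add confirmed a) b) else confirmed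
    let needed := ([2, 3, 4] : List Int).foldl
        (fun nd k => if nd.get? k = some none ∧ (k ≤ PySem.Set.len confirmed) then
            nd.insert k (some t) else nd) needed
    if needed.values.all (fun v => v.isSome) then needed
    else simAloop placement rest confirmed needed

def simulate_sequence (pairs : List (Int × Int)) (placements : List (List Int)) :
    List (List Int × List (Int × Option Int)) :=
  (placements.foldl
    (fun results placement =>
      results.insert placement
        (simAloop placement (PySem.List.enumerate pairs 1) PySem.Set.empty
          (PySem.Dict.ofList [(2, none), (3, none), (4, none)])))
    PySem.Dict.empty).items.map (fun pr => (pr.1, pr.2.items))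

-- ===== PORT B =====

-- B's scan: first[x] = first test index confirming battery x (setdefault = insert only if absent; exact)
def simBfirst (placement : List Int) : List (Int × (Int × Int)) → PySem.Dict Int Int →
    PySem.Dict Int Int
  | [], d => d
  | (t, (a, b)) :: rest, d =>
    let d := if placement.contains a && placement.contains b then
        let d := if d.contains a then d else d.insert a t   -- first.setdefault(a, t)
        if d.contains b then d else d.insert b t            -- first.setdefault(b, t)
      else d
    simBfirst placement rest d

-- B's dict comprehension {k: times[k-1] if len(times) >= k else None for k in (2, 3, 4)}
def simBneeded (times : List Int) : List (Int × Option Int) :=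
  ([2, 3, 4] : List Int).map (fun k =>
    (k, if (k : Int) ≤ (times.length : Int) then PySem.List.pyGet? times (k - 1) else none))

def simulate_sequence_alt (pairs : List (Int × Int)) (placements : List (List Int)) :
    List (List Int × List (Int × Option Int)) :=
  (placements.foldl
    (fun results placement =>
      results.insert placement
        (simBneeded (PySem.List.sorted
          ((simBfirst placement (PySem.List.enumerate pairs 1) PySem.Dict.empty).values)
          (fun x => x))))
    PySem.Dict.empty).items

-- ===== PRECONDITION & SPEC =====
def Spec_simulate_sequence (pairs : List (Int × Int)) (placements : List (List Int)) (out : List (List Int × List (Int × Option Int))) : Prop := out = simulate_sequence_alt pairs placements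
instance (pairs : List (Int × Int)) (placements : List (List Int)) (out : List (List Int × List (Int × Option Int))) : Decidable (Spec_simulate_sequence pairs placements out) := by unfold Spec_simulate_sequence; infer_instance

-- ===== CLAIM (what is proved, stated in full; the proofs are below) =====
def Claim_equal_simulate_sequence : Prop := ∀ (pairs : List (Int × Int)) (placements : List (List Int)), Dom_simulate_sequence pairs placements → Spec_simulate_sequence pairs placements (simulate_sequence pairs placements)

-- ===== LEMMAS AND PROOFS =====

-- Proof-only bridge: the "events" view of the confirmation process — the list of test indices at
-- which the confirmed set grew, one entry per newly confirmed battery, with A's ≥4 break.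
def pvEvLoop (placement : List Int) : List (Int × (Int × Int)) → PySem.Set Int →
    List Int → List Int
  | [], _, events => events
  | (t, (a, b)) :: rest, confirmed, events =>
    let st := if placement.contains a && placement.contains b then
        ([a, b].foldl (fun s x =>
            if PySem.Set.contains s.1 x then s
            else (PySem.Set.add s.1 x, s.2 ++ [t])) (confirmed, events))
      else (confirmed, events)
    if (4 : Int) ≤ PySem.Set.len st.1 then st.2
    else pvEvLoop placement rest st.1 st.2

-- same scan without the break
def pvFull (placement : List Int) : List (Int × (Int × Int)) → PySem.Set Int →
    List Int → List Int
  | [], _, events => events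
  | (t, (a, b)) :: rest, confirmed, events =>
    let st := if placement.contains a && placement.contains b then
        ([a, b].foldl (fun s x =>
            if PySem.Set.contains s.1 x then s
            else (PySem.Set.add s.1 x, s.2 ++ [t])) (confirmed, events))
      else (confirmed, events)
    pvFull placement rest st.1 st.2

-- the value B stores for threshold k
def pvThr (events : List Int) (k : Int) : Option Int :=
  if k ≤ (events.length : Int) then PySem.List.pyGet? events (k - 1) else none

theorem pvSimBneeded_eq (events : List Int) :
    simBneeded events = [(2, pvThr events 2), (3, pvThr events 3), (4, pvThr events 4)] := rfl

theorem pvThr_isSome (events : List Int) (k : Int) (hk : 1 ≤ k) :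
    (pvThr events k).isSome = decide (k ≤ (events.length : Int)) := by
  unfold pvThr
  by_cases h : k ≤ (events.length : Int)
  · have h0 : (0:Int) ≤ k - 1 := by omega
    have h1 : k - 1 < (events.length : Int) := by omega
    rw [if_pos h, PySem.List.pyGet?_eq_some_getElem events h0 h1]
    simp [h]
  · simp [h]

theorem pvThr_step (events : List Int) (t : Int) (m : Nat) (k : Int) (hk : 1 ≤ k) :
    (if pvThr events k = none ∧ k ≤ ((events.length + m : Nat) : Int) then some t
     else pvThr events k) = pvThr (events ++ List.replicate m t) k := by
  unfold pvThr
  by_cases hL : k ≤ (events.length : Int)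
  · have hs : PySem.List.pyGet? events (k - 1) = some events[(k - 1).toNat] :=
      PySem.List.pyGet?_eq_some_getElem events (by omega) (by omega)
    have hL' : k ≤ ((events ++ List.replicate m t).length : Int) := by simp; omega
    have hs' : PySem.List.pyGet? (events ++ List.replicate m t) (k - 1)
        = some (events ++ List.replicate m t)[(k - 1).toNat] :=
      PySem.List.pyGet?_eq_some_getElem _ (by omega) (by simp; omega)
    rw [if_pos hL, if_neg (by rw [hs]; simp), if_pos hL', hs, hs']
    congr 1
    exact (List.getElem_append_left (by omega)).symm
  · rw [if_neg hL]
    by_cases hM : k ≤ ((events.length + m : Nat) : Int)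
    · have hL' : k ≤ ((events ++ List.replicate m t).length : Int) := by simp; omega
      have hs' : PySem.List.pyGet? (events ++ List.replicate m t) (k - 1)
          = some (events ++ List.replicate m t)[(k - 1).toNat] :=
        PySem.List.pyGet?_eq_some_getElem _ (by omega) (by simp; omega)
      rw [if_pos ⟨rfl, hM⟩, if_pos hL', hs']
      congr 1
      rw [List.getElem_append_right (by omega)]
      exact (List.getElem_replicate _).symm
    · rw [if_neg (by simp; omega), if_neg (by simp; omega)]

-- pvThr at an index inside the prefix ignores any extension
theorem pvThr_prefix (events ex : List Int) (k : Int) (hk : 1 ≤ k)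
    (hL : k ≤ (events.length : Int)) :
    pvThr (events ++ ex) k = pvThr events k := by
  unfold pvThr
  have hlen : ((events ++ ex).length : Int) = (events.length : Int) + (ex.length : Int) := by
    rw [List.length_append]; push_cast; ring
  have hs : PySem.List.pyGet? events (k - 1) = some events[(k - 1).toNat] :=
    PySem.List.pyGet?_eq_some_getElem events (by omega) (by omega)
  have hs' : PySem.List.pyGet? (events ++ ex) (k - 1) = some (events ++ ex)[(k - 1).toNat] :=
    PySem.List.pyGet?_eq_some_getElem _ (by omega) (by rw [hlen]; omega)
  rw [if_pos hL, if_pos (by rw [hlen]; omega), hs, hs']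
  congr 1
  exact List.getElem_append_left (by omega)

-- one fold step of A's [2,3,4]-scan over the literal needed dict, per key
theorem pvStep2 (y2 y3 y4 : Option Int) (M t : Int) :
    (if (PySem.Dict.mk [((2:Int), y2), (3, y3), (4, y4)]).get? 2 = some none ∧ (2:Int) ≤ M
      then (PySem.Dict.mk [((2:Int), y2), (3, y3), (4, y4)]).insert 2 (some t)
      else PySem.Dict.mk [((2:Int), y2), (3, y3), (4, y4)])
    = PySem.Dict.mk [((2:Int), if y2 = none ∧ (2:Int) ≤ M then some t else y2), (3, y3), (4, y4)] := by
  have hget : (PySem.Dict.mk [((2:Int), y2), (3, y3), (4, y4)]).get? 2 = some y2 := rfl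
  have hins : (PySem.Dict.mk [((2:Int), y2), (3, y3), (4, y4)]).insert 2 (some t)
      = PySem.Dict.mk [((2:Int), some t), (3, y3), (4, y4)] := rfl
  rw [hget, hins]
  by_cases h : y2 = none ∧ (2:Int) ≤ M
  · rw [if_pos ⟨by rw [h.1], h.2⟩, if_pos h]
  · rw [if_neg (by simpa using h), if_neg h]

theorem pvStep3 (y2 y3 y4 : Option Int) (M t : Int) :
    (if (PySem.Dict.mk [((2:Int), y2), (3, y3), (4, y4)]).get? 3 = some none ∧ (3:Int) ≤ M
      then (PySem.Dict.mk [((2:Int), y2), (3, y3), (4, y4)]).insert 3 (some t)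
      else PySem.Dict.mk [((2:Int), y2), (3, y3), (4, y4)])
    = PySem.Dict.mk [((2:Int), y2), (3, if y3 = none ∧ (3:Int) ≤ M then some t else y3), (4, y4)] := by
  have hget : (PySem.Dict.mk [((2:Int), y2), (3, y3), (4, y4)]).get? 3 = some y3 := rfl
  have hins : (PySem.Dict.mk [((2:Int), y2), (3, y3), (4, y4)]).insert 3 (some t)
      = PySem.Dict.mk [((2:Int), y2), (3, some t), (4, y4)] := rfl
  rw [hget, hins]
  by_cases h : y3 = none ∧ (3:Int) ≤ M
  · rw [if_pos ⟨by rw [h.1], h.2⟩, if_pos h]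
  · rw [if_neg (by simpa using h), if_neg h]

theorem pvStep4 (y2 y3 y4 : Option Int) (M t : Int) :
    (if (PySem.Dict.mk [((2:Int), y2), (3, y3), (4, y4)]).get? 4 = some none ∧ (4:Int) ≤ M
      then (PySem.Dict.mk [((2:Int), y2), (3, y3), (4, y4)]).insert 4 (some t)
      else PySem.Dict.mk [((2:Int), y2), (3, y3), (4, y4)])
    = PySem.Dict.mk [((2:Int), y2), (3, y3), (4, if y4 = none ∧ (4:Int) ≤ M then some t else y4)] := by
  have hget : (PySem.Dict.mk [((2:Int), y2), (3, y3), (4, y4)]).get? 4 = some y4 := rfl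
  have hins : (PySem.Dict.mk [((2:Int), y2), (3, y3), (4, y4)]).insert 4 (some t)
      = PySem.Dict.mk [((2:Int), y2), (3, y3), (4, some t)] := rfl
  rw [hget, hins]
  by_cases h : y4 = none ∧ (4:Int) ≤ M
  · rw [if_pos ⟨by rw [h.1], h.2⟩, if_pos h]
  · rw [if_neg (by simpa using h), if_neg h]

-- the concrete [2,3,4]-fold A performs on the needed dict
theorem pvNeeded_foldl (x2 x3 x4 : Option Int) (M t : Int) :
    ([2, 3, 4] : List Int).foldl
      (fun nd k => if nd.get? k = some none ∧ (k ≤ M) then nd.insert k (some t) else nd)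
      (PySem.Dict.mk [(2, x2), (3, x3), (4, x4)])
    = PySem.Dict.mk [(2, if x2 = none ∧ (2 : Int) ≤ M then some t else x2),
                     (3, if x3 = none ∧ (3 : Int) ≤ M then some t else x3),
                     (4, if x4 = none ∧ (4 : Int) ≤ M then some t else x4)] := by
  simp only [List.foldl]
  rw [pvStep2, pvStep3, pvStep4]

-- one step of the inner (a, b)-fold, as an append of a replicate of the test index
theorem pvStep_shape (placement : List Int) (a b t : Int) (confirmed : PySem.Set Int)
    (events : List Int) (h : events.length = confirmed.length) :
    ∃ m : Nat,
      (if placement.contains a && placement.contains b then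
          ([a, b].foldl (fun s x =>
              if PySem.Set.contains s.1 x then s
              else (PySem.Set.add s.1 x, s.2 ++ [t])) (confirmed, events))
        else (confirmed, events))
      = ((if placement.contains a && placement.contains b then
            PySem.Set.add (PySem.Set.add confirmed a) b else confirmed),
         events ++ List.replicate m t) ∧
        ((if placement.contains a && placement.contains b then
            PySem.Set.add (PySem.Set.add confirmed a) b else confirmed) : List Int).length
          = events.length + m := by
  by_cases hc : (placement.contains a && placement.contains b) = true
  · simp only [if_pos hc]
    simp only [List.foldl_cons, List.foldl_nil]
    unfold PySem.Set.add
    split_ifs <;>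
      first
        | exact ⟨0, by simp, by simp; omega⟩
        | exact ⟨1, by simp, by simp; omega⟩
        | exact ⟨2, by simp [List.replicate_succ], by simp; omega⟩
  · simp only [if_neg hc]
    exact ⟨0, by simp, by omega⟩

-- break-condition bridge: all three slots filled iff four batteries confirmed
theorem pvAll_isSome (events : List Int) :
    ((PySem.Dict.mk (simBneeded events)).values.all (fun v => v.isSome))
      = decide ((4 : Int) ≤ (events.length : Int)) := by
  rw [pvSimBneeded_eq]
  show ((pvThr events 2).isSome && ((pvThr events 3).isSome && ((pvThr events 4).isSome && true))) = _
  rw [pvThr_isSome events 2 (by omega), pvThr_isSome events 3 (by omega),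
      pvThr_isSome events 4 (by omega)]
  by_cases h4 : (4 : Int) ≤ (events.length : Int) <;>
    by_cases h3 : (3 : Int) ≤ (events.length : Int) <;>
      by_cases h2 : (2 : Int) ≤ (events.length : Int) <;>
        simp [h2, h3, h4] <;> omega

-- A's loop produces exactly the needed-dict read off the events list
theorem pvKey (placement : List Int) (ps : List (Int × (Int × Int)))
    (confirmed : PySem.Set Int) (events : List Int)
    (h : events.length = confirmed.length) :
    (simAloop placement ps confirmed (PySem.Dict.mk (simBneeded events))).items
      = simBneeded (pvEvLoop placement ps confirmed events) := by
  induction ps generalizing confirmed events with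
  | nil => rfl
  | cons p rest ih =>
    obtain ⟨t, a, b⟩ := p
    obtain ⟨m, hst, hlen⟩ := pvStep_shape placement a b t confirmed events h
    simp only [simAloop, pvEvLoop]
    rw [hst]
    have hM : PySem.Set.len (if placement.contains a && placement.contains b then
        PySem.Set.add (PySem.Set.add confirmed a) b else confirmed)
        = ((events.length + m : Nat) : Int) := by
      simp only [PySem.Set.len]
      omega
    rw [hM, pvSimBneeded_eq events, pvNeeded_foldl]
    rw [show (if pvThr events 2 = none ∧ (2:Int) ≤ ((events.length + m : Nat) : Int)
          then some t else pvThr events 2) = pvThr (events ++ List.replicate m t) 2 from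
        pvThr_step events t m 2 (by omega),
        show (if pvThr events 3 = none ∧ (3:Int) ≤ ((events.length + m : Nat) : Int)
          then some t else pvThr events 3) = pvThr (events ++ List.replicate m t) 3 from
        pvThr_step events t m 3 (by omega),
        show (if pvThr events 4 = none ∧ (4:Int) ≤ ((events.length + m : Nat) : Int)
          then some t else pvThr events 4) = pvThr (events ++ List.replicate m t) 4 from
        pvThr_step events t m 4 (by omega)]
    rw [← pvSimBneeded_eq (events ++ List.replicate m t)]
    rw [pvAll_isSome (events ++ List.replicate m t)]
    by_cases h4 : (4 : Int) ≤ ((events.length + m : Nat) : Int)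
    · rw [if_pos (by simp; omega), if_pos h4]
    · rw [if_neg (by simp; omega), if_neg h4]
      refine ih _ _ ?_
      simp only [List.length_append, List.length_replicate]
      omega

-- the no-break scan only extends the events accumulator
theorem pvFull_extends (placement : List Int) (ps : List (Int × (Int × Int)))
    (confirmed : PySem.Set Int) (events : List Int)
    (h : events.length = confirmed.length) :
    ∃ ex, pvFull placement ps confirmed events = events ++ ex := by
  induction ps generalizing confirmed events with
  | nil =>
    have hnil : pvFull placement [] confirmed events = events := rfl
    exact ⟨[], by rw [hnil, List.append_nil]⟩
  | cons p rest ih =>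
    obtain ⟨t, a, b⟩ := p
    obtain ⟨m, hst, hlen⟩ := pvStep_shape placement a b t confirmed events h
    simp only [pvFull]
    rw [hst]
    obtain ⟨ex, hex⟩ := ih (if placement.contains a && placement.contains b then
        PySem.Set.add (PySem.Set.add confirmed a) b else confirmed)
      (events ++ List.replicate m t)
      (by simp only [List.length_append, List.length_replicate]; omega)
    exact ⟨List.replicate m t ++ ex, by rw [hex, List.append_assoc]⟩

-- the break loses nothing seen through pvThr at k ≤ 4
theorem pvLoop_full (placement : List Int) (ps : List (Int × (Int × Int)))
    (confirmed : PySem.Set Int) (events : List Int)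
    (h : events.length = confirmed.length) (k : Int) (hk1 : 1 ≤ k) (hk4 : k ≤ 4) :
    pvThr (pvEvLoop placement ps confirmed events) k
      = pvThr (pvFull placement ps confirmed events) k := by
  induction ps generalizing confirmed events with
  | nil => rfl
  | cons p rest ih =>
    obtain ⟨t, a, b⟩ := p
    obtain ⟨m, hst, hlen⟩ := pvStep_shape placement a b t confirmed events h
    simp only [pvEvLoop, pvFull]
    rw [hst]
    by_cases h4 : (4 : Int) ≤ PySem.Set.len (if placement.contains a && placement.contains b then
        PySem.Set.add (PySem.Set.add confirmed a) b else confirmed)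
    · rw [if_pos h4]
      obtain ⟨ex, hex⟩ := pvFull_extends placement rest
        (if placement.contains a && placement.contains b then
          PySem.Set.add (PySem.Set.add confirmed a) b else confirmed)
        (events ++ List.replicate m t)
        (by simp only [List.length_append, List.length_replicate]; omega)
      rw [hex]
      refine (pvThr_prefix _ ex k hk1 ?_).symm
      simp only [PySem.Set.len] at h4
      simp only [List.length_append, List.length_replicate]
      omega
    · rw [if_neg h4]
      refine ih _ _ ?_
      simp only [List.length_append, List.length_replicate]
      omega

-- Dict.contains seen through its keys list
theorem pvContains_keys (d : PySem.Dict Int Int) (x : Int) :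
    PySem.Set.contains (d.keys) x = d.contains x := by
  rw [Bool.eq_iff_iff, PySem.Dict.contains_eq_decide_mem_keys]
  simp [PySem.Set.contains]

-- Python's first.setdefault(x, t)
def pvSD (d : PySem.Dict Int Int) (x t : Int) : PySem.Dict Int Int :=
  if d.contains x then d else d.insert x t

-- one confirmation step, on the (keys, values) view of the first-time map
theorem pvStep1 (d : PySem.Dict Int Int) (x t : Int) :
    (if PySem.Set.contains d.keys x then ((d.keys, d.values) : PySem.Set Int × List Int)
     else (PySem.Set.add d.keys x, d.values ++ [t]))
    = ((pvSD d x t).keys, (pvSD d x t).values) := by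
  by_cases h : d.contains x = true
  · have hc : PySem.Set.contains d.keys x = true := (pvContains_keys d x).trans h
    rw [if_pos hc]
    unfold pvSD
    rw [if_pos h]
  · simp only [Bool.not_eq_true] at h
    have hc : PySem.Set.contains d.keys x = false := (pvContains_keys d x).trans h
    rw [if_neg (by rw [hc]; simp)]
    unfold pvSD
    rw [if_neg (by rw [h]; simp)]
    have hadd : PySem.Set.add d.keys x = d.keys ++ [x] := by
      unfold PySem.Set.add
      rw [if_neg (by rw [hc]; simp)]
    have hins : (d.insert x t).items = d.items ++ [(x, t)] := by
      unfold PySem.Dict.insert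
      rw [if_neg (by rw [h]; simp)]
    have hk : (d.insert x t).keys = d.keys ++ [x] := by
      unfold PySem.Dict.keys
      rw [hins, List.map_append]
      rfl
    have hv : (d.insert x t).values = d.values ++ [t] := by
      unfold PySem.Dict.values
      rw [hins, List.map_append]
      rfl
    rw [hadd, hk, hv]

-- the two-battery fold of one passing test, as two setdefaults
theorem pvSDpair (d : PySem.Dict Int Int) (a b t : Int) :
    ([a, b].foldl (fun s x =>
        if PySem.Set.contains s.1 x then s
        else (PySem.Set.add s.1 x, s.2 ++ [t])) (d.keys, d.values))
    = ((pvSD (pvSD d a t) b t).keys, (pvSD (pvSD d a t) b t).values) := by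
  have h1 : (if PySem.Set.contains ((d.keys, d.values) : PySem.Set Int × List Int).1 a
      then ((d.keys, d.values) : PySem.Set Int × List Int)
      else (PySem.Set.add ((d.keys, d.values) : PySem.Set Int × List Int).1 a,
        ((d.keys, d.values) : PySem.Set Int × List Int).2 ++ [t]))
      = ((pvSD d a t).keys, (pvSD d a t).values) := pvStep1 d a t
  have h2 : (if PySem.Set.contains
        (((pvSD d a t).keys, (pvSD d a t).values) : PySem.Set Int × List Int).1 b
      then (((pvSD d a t).keys, (pvSD d a t).values) : PySem.Set Int × List Int)
      else (PySem.Set.add (((pvSD d a t).keys, (pvSD d a t).values) : PySem.Set Int × List Int).1 b,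
        (((pvSD d a t).keys, (pvSD d a t).values) : PySem.Set Int × List Int).2 ++ [t]))
      = ((pvSD (pvSD d a t) b t).keys, (pvSD (pvSD d a t) b t).values) := pvStep1 (pvSD d a t) b t
  rw [List.foldl_cons, h1, List.foldl_cons, h2, List.foldl_nil]

-- B's first-time map is the events view: keys track the confirmed set, values the events list
theorem pvFirst_eq_full (placement : List Int) (ps : List (Int × (Int × Int)))
    (d : PySem.Dict Int Int) :
    (simBfirst placement ps d).values = pvFull placement ps d.keys d.values := by
  induction ps generalizing d with
  | nil => rfl
  | cons p rest ih =>
    obtain ⟨t, a, b⟩ := p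
    simp only [simBfirst, pvFull]
    by_cases hc : (placement.contains a && placement.contains b) = true
    · rw [if_pos hc, if_pos hc, pvSDpair d a b t]
      exact ih (pvSD (pvSD d a t) b t)
    · rw [if_neg hc, if_neg hc]
      exact ih d

-- the events produced by the no-break scan over enumerate(pairs, n) are nondecreasing
theorem pvEnum_cons (x : Int × Int) (rest : List (Int × Int)) (n : Int) :
    PySem.List.enumerate (x :: rest) n = (n, x) :: PySem.List.enumerate rest (n + 1) := rfl

theorem pvFull_pairwise (placement : List Int) (xs : List (Int × Int)) (n : Int)
    (confirmed : PySem.Set Int) (events : List Int)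
    (h : events.length = confirmed.length)
    (hp : events.Pairwise (· ≤ ·)) (hb : ∀ e ∈ events, e ≤ n) :
    (pvFull placement (PySem.List.enumerate xs n) confirmed events).Pairwise (· ≤ ·) := by
  induction xs generalizing n confirmed events with
  | nil =>
    have hnil : pvFull placement (PySem.List.enumerate ([] : List (Int × Int)) n)
        confirmed events = events := rfl
    rw [hnil]; exact hp
  | cons x rest ih =>
    obtain ⟨a, b⟩ := x
    rw [pvEnum_cons]
    obtain ⟨m, hst, hlen⟩ := pvStep_shape placement a b n confirmed events h
    simp only [pvFull]
    rw [hst]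
    refine ih (n + 1) _ _ (by simp only [List.length_append, List.length_replicate]; omega) ?_ ?_
    · refine List.pairwise_append.mpr ⟨hp, List.pairwise_replicate.mpr (by simp), ?_⟩
      intro e he f hf
      rw [List.eq_of_mem_replicate hf]
      exact hb e he
    · intro e he
      rcases List.mem_append.mp he with h1 | h2
      · have := hb e h1; omega
      · rw [List.eq_of_mem_replicate h2]; omega

-- per-placement equality of the two ports
theorem pvPlace (pairs : List (Int × Int)) (placement : List Int) :
    (simAloop placement (PySem.List.enumerate pairs 1) PySem.Set.empty
        (PySem.Dict.ofList [(2, none), (3, none), (4, none)])).items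
      = simBneeded (PySem.List.sorted
          ((simBfirst placement (PySem.List.enumerate pairs 1) PySem.Dict.empty).values)
          (fun x => x)) := by
  have hfull : (simBfirst placement (PySem.List.enumerate pairs 1) PySem.Dict.empty).values
      = pvFull placement (PySem.List.enumerate pairs 1) PySem.Set.empty [] :=
    pvFirst_eq_full placement (PySem.List.enumerate pairs 1) PySem.Dict.empty
  have hpw : (pvFull placement (PySem.List.enumerate pairs 1) PySem.Set.empty []).Pairwise
      ((· ≤ ·) : Int → Int → Prop) :=
    pvFull_pairwise placement pairs 1 PySem.Set.empty [] rfl (by simp) (by simp)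
  have hsorted : PySem.List.sorted
        ((simBfirst placement (PySem.List.enumerate pairs 1) PySem.Dict.empty).values)
        (fun x => x)
      = pvFull placement (PySem.List.enumerate pairs 1) PySem.Set.empty [] := by
    rw [hfull]
    exact PySem.List.sorted_eq_self_of_pairwise _ _ hpw
  rw [hsorted]
  have h0 : (PySem.Dict.ofList [((2:Int), (none : Option Int)), (3, none), (4, none)])
      = PySem.Dict.mk (simBneeded []) := by decide
  rw [h0, pvKey placement (PySem.List.enumerate pairs 1) PySem.Set.empty [] rfl]
  rw [pvSimBneeded_eq, pvSimBneeded_eq]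
  rw [pvLoop_full placement _ PySem.Set.empty [] rfl 2 (by omega) (by omega),
      pvLoop_full placement _ PySem.Set.empty [] rfl 3 (by omega) (by omega),
      pvLoop_full placement _ PySem.Set.empty [] rfl 4 (by omega) (by omega)]

theorem pvOuter (fv : List Int → PySem.Dict Int (Option Int))
    (gv : List Int → List (Int × Option Int))
    (hv : ∀ p, (fv p).items = gv p)
    (placements : List (List Int))
    (dA : PySem.Dict (List Int) (PySem.Dict Int (Option Int)))
    (dB : PySem.Dict (List Int) (List (Int × Option Int)))
    (hd : dB.items = dA.items.map (fun pr => (pr.1, pr.2.items))) :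
    ((placements.foldl (fun results placement => results.insert placement (fv placement)) dA).items.map
      (fun pr => (pr.1, pr.2.items)))
    = (placements.foldl (fun results placement => results.insert placement (gv placement)) dB).items := by
  induction placements generalizing dA dB with
  | nil => rw [List.foldl_nil, List.foldl_nil, hd]
  | cons p rest ih =>
    rw [List.foldl_cons, List.foldl_cons]
    refine ih _ _ ?_
    have hcont : (dB.contains p) = (dA.contains p) := by
      simp [PySem.Dict.contains, hd, List.any_map, Function.comp_def]
    by_cases hpc : dA.contains p = true
    · simp only [PySem.Dict.insert, hcont, hpc, if_pos]
      rw [hd, List.map_map, List.map_map]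
      refine List.map_congr_left (fun pr _ => ?_)
      by_cases hpr : pr.1 = p <;> simp [hpr, hv]
    · simp only [PySem.Dict.insert, hcont, hpc, Bool.false_eq_true, ite_false]
      rw [List.map_append, hd]
      simp [hv]

-- ===== VERDICT (by name: the statement is the Claim_ definition above) =====
theorem simulate_sequence_spec : Claim_equal_simulate_sequence := by
  intro pairs placements _
  unfold Spec_simulate_sequence simulate_sequence simulate_sequence_alt
  exact pvOuter _ _ (fun p => pvPlace pairs p) placements PySem.Dict.empty PySem.Dict.empty rfl
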